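-- pv_equiv track=rewrite | github.com/escapeTheFate1991/warroom | backend/app/services/competitor_benchmarks.py | _analyze_user_hook_style
-- ===== SOURCE A (Python) =====
-- from typing import Dict, List, Any, Optional, Tuple
--
-- def _analyze_user_hook_style(processed_videos: List[Dict[str, Any]]) -> str:
--     """Analyze user's hook style from processed videos."""
--     if not processed_videos:
--         return "Style not yet analyzed"
--
--     # Simple analysis based on video strengths
--     hook_indicators = []
--     for video in processed_videos:
--         strengths = video.get("strengths", [])
--         for strength in strengths:
--             if "hook" in strength.lower():
--                 hook_indicators.append(strength)
--
--     if not hook_indicators: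
--         return "No clear hook pattern identified"
--
--     # Basic pattern detection
--     if any("question" in indicator.lower() for indicator in hook_indicators):
--         return "Question-based hooks"
--     elif any("strong" in indicator.lower() for indicator in hook_indicators):
--         return "Direct statement hooks"
--     else:
--         return "Mixed hook style"
-- ===== SOURCE B (Python) =====
-- from typing import Dict, List, Any
--
--
-- def _analyze_user_hook_style(processed_videos: List[Dict[str, Any]]) -> str:
--     """Analyze user's hook style from processed videos (single-pass flags)."""
--     if not processed_videos:
--         return "Style not yet analyzed"
--
--     found_hook = has_question = has_strong = False
--     for video in processed_videos:
--         for strength in video.get("strengths", []):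
--             low = strength.lower()
--             if "hook" in low:
--                 found_hook = True
--                 has_question = has_question or "question" in low
--                 has_strong = has_strong or "strong" in low
--
--     if not found_hook:
--         return "No clear hook pattern identified"
--     if has_question:
--         return "Question-based hooks"
--     if has_strong:
--         return "Direct statement hooks"
--     return "Mixed hook style"
-- ===== Notes on version B (the rewrite author's own statement) =====
-- stated objective: simpler
-- what changed: Replaces A's build-a-list-of-hook-indicators plus two subsequent any() rescans (each re-lowercasing every indicator) with a single pass that keeps three boolean flags and lowercases each strength once; no intermediate list is materialized.
import Mathlib
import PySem

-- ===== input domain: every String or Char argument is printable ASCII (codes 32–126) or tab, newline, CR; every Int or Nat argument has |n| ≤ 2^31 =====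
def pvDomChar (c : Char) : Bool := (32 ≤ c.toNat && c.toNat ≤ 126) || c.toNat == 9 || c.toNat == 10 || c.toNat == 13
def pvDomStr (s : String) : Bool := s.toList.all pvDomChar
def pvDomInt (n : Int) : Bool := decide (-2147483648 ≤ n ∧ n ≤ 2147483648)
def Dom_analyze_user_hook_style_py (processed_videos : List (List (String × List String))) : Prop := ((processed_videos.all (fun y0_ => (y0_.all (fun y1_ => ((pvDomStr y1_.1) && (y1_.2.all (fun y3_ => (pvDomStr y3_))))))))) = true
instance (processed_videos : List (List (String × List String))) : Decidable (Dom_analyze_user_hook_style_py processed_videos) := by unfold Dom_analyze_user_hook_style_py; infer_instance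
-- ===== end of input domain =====

-- ===== PORT A =====
-- A collects the hook-containing strengths into a list, then rescans it twice.
def pvStrengths (video : List (String × List String)) : List String :=
  PySem.Dict.getD (PySem.Dict.mk video) "strengths" []

def pvStepA (acc : List String) (s : String) : List String :=
  if PySem.Str.isIn "hook" (PySem.Str.lower s) then acc ++ [s] else acc

def analyze_user_hook_style_py (processed_videos : List (List (String × List String))) : String :=
  if processed_videos = [] then "Style not yet analyzed"
  else
    let hook_indicators : List String :=
      processed_videos.foldl (fun acc video => (pvStrengths video).foldl pvStepA acc) []
    if hook_indicators = [] then "No clear hook pattern identified"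
    else if hook_indicators.any (fun i => PySem.Str.isIn "question" (PySem.Str.lower i)) then
      "Question-based hooks"
    else if hook_indicators.any (fun i => PySem.Str.isIn "strong" (PySem.Str.lower i)) then
      "Direct statement hooks"
    else "Mixed hook style"

-- ===== PORT B =====
-- B keeps three boolean flags in a single pass; each strength is lowercased once.
def pvStepB (acc : Bool × Bool × Bool) (s : String) : Bool × Bool × Bool :=
  let low := PySem.Str.lower s
  if PySem.Str.isIn "hook" low then
    (true, acc.2.1 || PySem.Str.isIn "question" low, acc.2.2 || PySem.Str.isIn "strong" low)
  else acc

def analyze_user_hook_style_py_alt (processed_videos : List (List (String × List String))) : String :=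
  if processed_videos = [] then "Style not yet analyzed"
  else
    let flags : Bool × Bool × Bool :=
      processed_videos.foldl (fun acc video => (pvStrengths video).foldl pvStepB acc)
        (false, false, false)
    if !flags.1 then "No clear hook pattern identified"
    else if flags.2.1 then "Question-based hooks"
    else if flags.2.2 then "Direct statement hooks"
    else "Mixed hook style"

-- ===== PRECONDITION & SPEC =====
def Spec_analyze_user_hook_style_py (processed_videos : List (List (String × List String))) (out : String) : Prop := out = analyze_user_hook_style_py_alt processed_videos
instance (processed_videos : List (List (String × List String))) (out : String) : Decidable (Spec_analyze_user_hook_style_py processed_videos out) := by unfold Spec_analyze_user_hook_style_py; infer_instance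

-- ===== CLAIM (what is proved, stated in full; the proofs are below) =====
def Claim_equal_analyze_user_hook_style_py : Prop := ∀ (processed_videos : List (List (String × List String))), Dom_analyze_user_hook_style_py processed_videos → Spec_analyze_user_hook_style_py processed_videos (analyze_user_hook_style_py processed_videos)

-- ===== LEMMAS AND PROOFS =====
def pvAbs (L : List String) : Bool × Bool × Bool :=
  (!L.isEmpty,
   L.any (fun i => PySem.Str.isIn "question" (PySem.Str.lower i)),
   L.any (fun i => PySem.Str.isIn "strong" (PySem.Str.lower i)))

theorem pvAbs_step (acc : List String) (s : String) :
    pvStepB (pvAbs acc) s = pvAbs (pvStepA acc s) := by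
  simp only [pvStepA, pvStepB, pvAbs]
  split_ifs with h <;> simp

theorem pvAbs_foldl (ss : List String) (acc : List String) :
    ss.foldl pvStepB (pvAbs acc) = pvAbs (ss.foldl pvStepA acc) := by
  induction ss generalizing acc with
  | nil => rfl
  | cons s t ih => simp only [List.foldl_cons, pvAbs_step, ih]

theorem pvAbs_outer (vs : List (List (String × List String))) (acc : List String) :
    vs.foldl (fun acc video => (pvStrengths video).foldl pvStepB acc) (pvAbs acc) =
      pvAbs (vs.foldl (fun acc video => (pvStrengths video).foldl pvStepA acc) acc) := by
  induction vs generalizing acc with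
  | nil => rfl
  | cons v t ih => simp only [List.foldl_cons, pvAbs_foldl, ih]

-- ===== VERDICT (by name: the statement is the Claim_ definition above) =====
theorem analyze_user_hook_style_py_spec : Claim_equal_analyze_user_hook_style_py := by
  intro pv _
  unfold Spec_analyze_user_hook_style_py analyze_user_hook_style_py analyze_user_hook_style_py_alt
  by_cases hpv : pv = []
  · simp [hpv]
  · simp only [if_neg hpv]
    have h := pvAbs_outer pv []
    have habs : pvAbs ([] : List String) = (false, false, false) := rfl
    rw [habs] at h
    rw [h]
    set L := pv.foldl (fun acc video => (pvStrengths video).foldl pvStepA acc) [] with hL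
    by_cases hE : L = []
    · simp [pvAbs, hE]
    · simp [pvAbs, hE, List.isEmpty_iff]
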